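-- pv_equiv track=rewrite | github.com/NCATS-Tangerine/greent | scripts/lookup_cops.py | choose_drug
-- ===== SOURCE A (Python) =====
-- def choose_drug(druglist):
--     for prefix in ['CHEMBL','PUBCHEM','MESH']:
--         goods = list(filter(lambda x: x.startswith(prefix), druglist))
--         if len(goods) > 0:
--             return goods[0]
--     if len(druglist) == 0:
--         return ''
--     return druglist[0]
-- ===== SOURCE B (Python) =====
-- def choose_drug(druglist):
--     chembl = None
--     pubchem = None
--     mesh = None
--     for d in druglist:
--         if chembl is None and d.startswith('CHEMBL'):
--             chembl = d
--         if pubchem is None and d.startswith('PUBCHEM'):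
--             pubchem = d
--         if mesh is None and d.startswith('MESH'):
--             mesh = d
--     if chembl is not None:
--         return chembl
--     if pubchem is not None:
--         return pubchem
--     if mesh is not None:
--         return mesh
--     return druglist[0] if druglist else ''
-- ===== Notes on version B (the rewrite author's own statement) =====
-- stated objective: alternative
-- what changed: replaces the three full filter passes (one per prefix) by a single pass over druglist recording the first element per prefix, then picks the first recorded prefix in priority order
import Mathlib
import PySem

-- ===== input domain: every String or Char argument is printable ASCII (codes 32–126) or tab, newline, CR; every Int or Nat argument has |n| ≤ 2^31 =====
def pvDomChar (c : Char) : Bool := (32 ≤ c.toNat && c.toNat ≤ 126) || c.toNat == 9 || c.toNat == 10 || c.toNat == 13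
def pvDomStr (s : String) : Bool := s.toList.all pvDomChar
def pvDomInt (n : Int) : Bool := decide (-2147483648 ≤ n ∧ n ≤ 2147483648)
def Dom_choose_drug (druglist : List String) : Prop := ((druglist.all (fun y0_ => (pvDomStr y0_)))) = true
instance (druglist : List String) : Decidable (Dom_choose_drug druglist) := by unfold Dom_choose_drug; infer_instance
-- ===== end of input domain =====

-- B replaces A's three full filter passes (one per prefix) by a single pass recording
-- the first element per prefix; same return value, proved equivalent on Dom.


-- ===== PORT A =====
-- A's `for prefix in [...]: goods = filter(...); if goods: return goods[0]` loop
def chooseLoop (druglist : List String) (prefixes : List String) : Option String :=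
  match prefixes with
  | [] => none
  | p :: rest =>
    match druglist.filter (fun x => PySem.Str.startswith x p) with
    | g :: _ => some g          -- len(goods) > 0: return goods[0]
    | [] => chooseLoop druglist rest

def choose_drug (druglist : List String) : String :=
  match chooseLoop druglist ["CHEMBL", "PUBCHEM", "MESH"] with
  | some g => g
  | none =>
    if druglist.length == 0 then ""
    else druglist.headD ""      -- druglist[0]; list known nonempty here

-- ===== PORT B =====
def altStep (st : Option String × Option String × Option String) (d : String) :
    Option String × Option String × Option String :=
  let c := if st.1.isNone && PySem.Str.startswith d "CHEMBL" then some d else st.1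
  let p := if st.2.1.isNone && PySem.Str.startswith d "PUBCHEM" then some d else st.2.1
  let m := if st.2.2.isNone && PySem.Str.startswith d "MESH" then some d else st.2.2
  (c, p, m)

def choose_drug_alt (druglist : List String) : String :=
  let st := druglist.foldl altStep (none, none, none)
  match st.1 with
  | some c => c
  | none =>
    match st.2.1 with
    | some p => p
    | none =>
      match st.2.2 with
      | some m => m
      | none =>
        match druglist with
        | d :: _ => d
        | [] => ""

-- ===== PRECONDITION & SPEC =====
def Spec_choose_drug (druglist : List String) (out : String) : Prop := out = choose_drug_alt druglist
instance (druglist : List String) (out : String) : Decidable (Spec_choose_drug druglist out) := by unfold Spec_choose_drug; infer_instance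

-- ===== CLAIM (what is proved, stated in full; the proofs are below) =====
def Claim_equal_choose_drug : Prop := ∀ (druglist : List String), Dom_choose_drug druglist → Spec_choose_drug druglist (choose_drug druglist)

-- ===== LEMMAS AND PROOFS =====

theorem head?_filter_eq_find? (p : String → Bool) (l : List String) :
    (l.filter p).head? = l.find? p := by
  induction l with
  | nil => rfl
  | cons a t ih =>
    by_cases h : p a = true
    · simp [h]
    · simp only [Bool.not_eq_true] at h
      simp [h, ih]

-- each component of the fold state is "keep first recorded, else first match in the rest"
theorem fold_components (l : List String) (st : Option String × Option String × Option String) :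
    (l.foldl altStep st) =
      (st.1.or (l.find? (fun x => PySem.Str.startswith x "CHEMBL")),
       st.2.1.or (l.find? (fun x => PySem.Str.startswith x "PUBCHEM")),
       st.2.2.or (l.find? (fun x => PySem.Str.startswith x "MESH"))) := by
  induction l generalizing st with
  | nil => simp
  | cons a t ih =>
    obtain ⟨c, p, m⟩ := st
    simp only [List.foldl_cons, ih, List.find?_cons]
    unfold altStep
    cases c <;> cases p <;> cases m <;>
      simp [Option.or] <;>
      (try cases hC : PySem.Str.startswith a "CHEMBL") <;>
      (try cases hP : PySem.Str.startswith a "PUBCHEM") <;>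
      (try cases hM : PySem.Str.startswith a "MESH") <;>
      simp_all [Option.or]

-- ===== VERDICT (by name: the statement is the Claim_ definition above) =====
theorem choose_drug_spec : Claim_equal_choose_drug := by
  intro l _
  unfold Spec_choose_drug choose_drug choose_drug_alt
  simp only [fold_components, Option.none_or]
  rw [← head?_filter_eq_find?, ← head?_filter_eq_find?, ← head?_filter_eq_find?]
  simp only [chooseLoop]
  cases l.filter (fun x => PySem.Str.startswith x "CHEMBL") with
  | cons g t => rfl
  | nil =>
    cases l.filter (fun x => PySem.Str.startswith x "PUBCHEM") with
    | cons g t => rfl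
    | nil =>
      cases l.filter (fun x => PySem.Str.startswith x "MESH") with
      | cons g t => rfl
      | nil =>
        cases l with
        | nil => rfl
        | cons d t => rfl
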